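-- pv_equiv track=rewrite | github.com/pypi-data/pypi-mirror-102 | packages/privex-curconv/privex_curconv-0.5.0-py3-none-any.whl/privex/curconv/base.py | is_numstr
-- ===== SOURCE A (Python) =====
-- def is_numstr(d: str):
--     if len(d) == 0: return False
--     if not d[0].isdigit() and not d[0] in ['.', '-', '+']:
--         return False
--     hasdot, has_e = False, False
--     for c in d[1:]:
--         if c == '.':
--             if hasdot: return False
--             hasdot = True
--             continue
--         if c == 'e':
--             if has_e: return False
--             has_e = True
--             continue
--         if c.isdigit() or c in [',', '-', '+']:
--             continue
--         return False
--     return True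
-- ===== SOURCE B (Python) =====
-- def is_numstr(d: str):
--     if len(d) == 0:
--         return False
--     if not (d[0].isdigit() or d[0] in '.-+'):
--         return False
--     rest = d[1:]
--     return (rest.count('.') <= 1 and rest.count('e') <= 1
--             and all(c.isdigit() or c in ',.-+e' for c in rest))
-- ===== Notes on version B (the rewrite author's own statement) =====
-- stated objective: simpler
-- what changed: Replaces A's single stateful scan with two mutable flags and early returns by independent declarative passes over d[1:]: two character counts ('.' and 'e' each at most once) plus an all() membership test.
import Mathlib
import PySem

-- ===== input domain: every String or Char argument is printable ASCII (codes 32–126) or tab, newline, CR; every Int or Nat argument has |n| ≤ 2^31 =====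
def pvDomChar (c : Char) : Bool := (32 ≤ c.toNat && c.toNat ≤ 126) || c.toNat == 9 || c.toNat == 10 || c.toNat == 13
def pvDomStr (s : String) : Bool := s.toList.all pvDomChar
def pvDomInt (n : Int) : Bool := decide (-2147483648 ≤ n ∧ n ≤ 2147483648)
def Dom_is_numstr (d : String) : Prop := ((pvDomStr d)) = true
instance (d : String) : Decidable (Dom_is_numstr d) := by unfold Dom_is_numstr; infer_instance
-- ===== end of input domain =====

-- B replaces A's single stateful flag-driven scan with independent passes (two counts + an all) over d[1:]: simpler decomposition, same cost.


-- ===== PORT A =====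
-- the flag-driven scan over d[1:]
def isNumLoopA : List Char → Bool → Bool → Bool
  | [], _, _ => true
  | c :: cs, hasdot, has_e =>
    if c = '.' then
      if hasdot then false else isNumLoopA cs true has_e
    else if c = 'e' then
      if has_e then false else isNumLoopA cs hasdot true
    else if PySem.Chars.isdigit c || c = ',' || c = '-' || c = '+' then
      isNumLoopA cs hasdot has_e
    else
      false

def is_numstr (d : String) : Bool :=
  match d.toList with
  | [] => false
  | c :: _ =>
    if !(PySem.Chars.isdigit c) && !(c = '.' || c = '-' || c = '+') then false
    else isNumLoopA (PySem.List.slice d.toList (some 1) none) false false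

-- ===== PORT B =====
def is_numstr_alt (d : String) : Bool :=
  match d.toList with
  | [] => false
  | c :: _ =>
    if !(PySem.Chars.isdigit c || c = '.' || c = '-' || c = '+') then false
    else
      let rest := PySem.List.slice d.toList (some 1) none
      decide (rest.count '.' ≤ 1) && decide (rest.count 'e' ≤ 1) &&
        rest.all (fun ch => PySem.Chars.isdigit ch || ch = ',' || ch = '.' || ch = '-' || ch = '+' || ch = 'e')

-- ===== PRECONDITION & SPEC =====
def Spec_is_numstr (d : String) (out : Bool) : Prop := out = is_numstr_alt d
instance (d : String) (out : Bool) : Decidable (Spec_is_numstr d out) := by unfold Spec_is_numstr; infer_instance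

-- ===== CLAIM (what is proved, stated in full; the proofs are below) =====
def Claim_equal_is_numstr : Prop := ∀ (d : String), Dom_is_numstr d → Spec_is_numstr d (is_numstr d)

-- ===== LEMMAS AND PROOFS =====

-- A's scan returns false exactly when a flag limit is exceeded or an invalid char occurs
theorem isNumLoopA_eq (cs : List Char) (hd he : Bool) :
    isNumLoopA cs hd he =
      (decide (cs.count '.' + (if hd then 1 else 0) ≤ 1) &&
       decide (cs.count 'e' + (if he then 1 else 0) ≤ 1) &&
       cs.all (fun ch => PySem.Chars.isdigit ch || ch = ',' || ch = '.' || ch = '-' || ch = '+' || ch = 'e')) := by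
  induction cs generalizing hd he with
  | nil => cases hd <;> cases he <;> simp [isNumLoopA]
  | cons c cs ih =>
    by_cases hdot : c = '.'
    · subst hdot
      cases hd
      · simp [isNumLoopA, ih]
      · simp [isNumLoopA]
    · by_cases hee : c = 'e'
      · subst hee
        cases he
        · simp [isNumLoopA, hdot, ih]
        · simp [isNumLoopA, hdot]
      · by_cases hval : PySem.Chars.isdigit c || c = ',' || c = '-' || c = '+'
        · have : isNumLoopA (c :: cs) hd he = isNumLoopA cs hd he := by
            simp [isNumLoopA, hdot, hee, hval]
          rw [this, ih]
          rcases Bool.or_eq_true _ _ |>.mp hval with h | h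
          · rcases Bool.or_eq_true _ _ |>.mp h with h | h
            · rcases Bool.or_eq_true _ _ |>.mp h with h | h <;>
                simp [hdot, hee, h]
            · simp [hdot, hee, h]
          · simp [hdot, hee, h]
        · have hA : isNumLoopA (c :: cs) hd he = false := by
            simp only [isNumLoopA, if_neg hdot, if_neg hee]
            simp [hval]
          rw [hA]
          simp only [Bool.or_eq_true, decide_eq_true_eq, not_or] at hval
          obtain ⟨⟨⟨h1, h2⟩, h3⟩, h4⟩ := hval
          replace h1 : PySem.Chars.isdigit c = false := by
            cases hx : PySem.Chars.isdigit c <;> simp_all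
          simp [List.all_cons, h1, h2, h3, h4, hdot, hee]

-- ===== VERDICT (by name: the statement is the Claim_ definition above) =====
theorem is_numstr_spec : Claim_equal_is_numstr := by
  intro d _
  unfold Spec_is_numstr is_numstr is_numstr_alt
  cases h : d.toList with
  | nil => rfl
  | cons c cs =>
    simp only [PySem.List.slice_from_one, List.tail_cons, isNumLoopA_eq]
    by_cases hc : PySem.Chars.isdigit c || c = '.' || c = '-' || c = '+'
    · simp only [Bool.or_eq_true, decide_eq_true_eq] at hc
      rcases hc with ((h1 | h1) | h1) | h1 <;> simp [h1]
    · simp only [Bool.or_eq_true, decide_eq_true_eq, not_or] at hc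
      obtain ⟨⟨⟨h1, h2⟩, h3⟩, h4⟩ := hc
      replace h1 : PySem.Chars.isdigit c = false := by
        cases hx : PySem.Chars.isdigit c <;> simp_all
      simp [h1, h2, h3, h4]
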